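-- pv_equiv track=rewrite | github.com/NMCTT/Game-2048 | game/game.py | compress_merge
-- ===== SOURCE A (Python) =====
-- def compress_merge(row):
--    new_row = [i for i in row if i != 0]
--    i = 0
--    score_gain = 0
--    while i < len(new_row) -1:
--       if new_row[i] == new_row[i+1]:
--          new_row[i] *= 2
--          score_gain += new_row[i]
--          new_row[i+1] = 0
--          i+= 2
--       else: i+=1
--    new_row = [i for i in new_row if i != 0]
--    while len(new_row) < 4 :
--       new_row.append(0)
--    return new_row,score_gain
-- ===== SOURCE B (Python) =====
-- def compress_merge(row):
--     nz = [v for v in row if v != 0]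
--     result = []
--     merged = False
--     score_gain = 0
--     for v in nz:
--         if result and not merged and result[-1] == v:
--             result[-1] *= 2
--             score_gain += result[-1]
--             merged = True
--         else:
--             result.append(v)
--             merged = False
--     result.extend([0] * (4 - len(result)))
--     return result, score_gain
-- ===== Notes on version B (the rewrite author's own statement) =====
-- stated objective: simpler
-- what changed: Replaces A's index-based while loop that writes merged pairs in place (with zero sentinels and a second zero-filter pass) by a single left-to-right pass keeping a result list and a 'last cell just merged' flag; padding is one extend instead of a while loop.
import Mathlib
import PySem

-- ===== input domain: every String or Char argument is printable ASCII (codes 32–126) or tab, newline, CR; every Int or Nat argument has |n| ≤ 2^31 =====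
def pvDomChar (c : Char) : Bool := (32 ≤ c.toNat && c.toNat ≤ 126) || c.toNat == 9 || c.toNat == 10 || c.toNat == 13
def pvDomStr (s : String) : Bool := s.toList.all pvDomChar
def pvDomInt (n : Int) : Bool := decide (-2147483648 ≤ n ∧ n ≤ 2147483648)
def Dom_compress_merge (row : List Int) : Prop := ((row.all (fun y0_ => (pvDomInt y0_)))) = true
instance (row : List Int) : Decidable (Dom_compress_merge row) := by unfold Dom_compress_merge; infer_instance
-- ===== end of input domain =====

-- B replaces A's in-place index walk (zero sentinels + second filter pass) by one
-- left-to-right pass with a result list and a 'just merged' flag; objective: simpler.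

-- ===== PORT A =====
-- the while loop of A: i walks over new_row, merging equal neighbours in place
def loopA (xs : List Int) (i : Nat) (score : Int) : List Int × Int :=
  if _h : i + 1 < xs.length then
    if xs.getD i 0 = xs.getD (i + 1) 0 then
      loopA ((xs.set i (xs.getD i 0 * 2)).set (i + 1) 0) (i + 2) (score + xs.getD i 0 * 2)
    else
      loopA xs (i + 1) score
  else (xs, score)
termination_by xs.length - i
decreasing_by
  · simp only [List.length_set]; omega
  · omega

-- the trailing 'while len(new_row) < 4: new_row.append(0)' of A
def padA (xs : List Int) : List Int :=
  if xs.length < 4 then padA (xs ++ [0]) else xs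
termination_by 4 - xs.length
decreasing_by simp; omega

def compress_merge (row : List Int) : List Int × Int :=
  let new_row := row.filter (fun x => x != 0)
  let p := loopA new_row 0 0
  let new_row2 := p.1.filter (fun x => x != 0)
  (padA new_row2, p.2)

-- ===== PORT B =====
-- B's for-loop: result is kept reversed (head = Python's result[-1]); merged = the flag
def loopB : List Int → List Int → Bool → Int → List Int × Int
  | [], acc, _, s => (acc.reverse, s)
  | v :: rest, a :: as_, false, s =>
      if a = v then loopB rest (a * 2 :: as_) true (s + a * 2)
      else loopB rest (v :: a :: as_) false s
  | v :: rest, acc, _, s => loopB rest (v :: acc) false s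

def compress_merge_alt (row : List Int) : List Int × Int :=
  let nz := row.filter (fun x => x != 0)
  let p := loopB nz [] false 0
  (p.1 ++ List.replicate (4 - p.1.length) 0, p.2)

-- ===== PRECONDITION & SPEC =====
def Spec_compress_merge (row : List Int) (out : List Int × Int) : Prop := out = compress_merge_alt row
instance (row : List Int) (out : List Int × Int) : Decidable (Spec_compress_merge row out) := by unfold Spec_compress_merge; infer_instance

-- ===== CLAIM (what is proved, stated in full; the proofs are below) =====
def Claim_equal_compress_merge : Prop := ∀ (row : List Int), Dom_compress_merge row → Spec_compress_merge row (compress_merge row)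

-- ===== LEMMAS AND PROOFS =====

-- result of A's while loop (before the second filter): merged pairs become [2a, 0]
def merge0 : List Int → List Int × Int
  | [] => ([], 0)
  | [a] => ([a], 0)
  | a :: b :: rest =>
      if a = b then (a * 2 :: 0 :: (merge0 rest).1, a * 2 + (merge0 rest).2)
      else (a :: (merge0 (b :: rest)).1, (merge0 (b :: rest)).2)

-- the common mathematical result: merged pairs collapse to one cell
def merge1 : List Int → List Int × Int
  | [] => ([], 0)
  | [a] => ([a], 0)
  | a :: b :: rest =>
      if a = b then (a * 2 :: (merge1 rest).1, a * 2 + (merge1 rest).2)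
      else (a :: (merge1 (b :: rest)).1, (merge1 (b :: rest)).2)

lemma loopA_spec : ∀ (xs p : List Int) (s : Int),
    loopA (p ++ xs) p.length s = (p ++ (merge0 xs).1, s + (merge0 xs).2) := by
  intro xs
  induction xs using merge0.induct with
  | case1 =>
      intro p s
      rw [loopA]
      simp [merge0]
  | case2 a =>
      intro p s
      rw [loopA]
      simp [merge0]
  | case3 b rest ih =>
      intro p s
      have hlen : p.length + 1 < (p ++ b :: b :: rest).length := by simp
      have hga : (p ++ b :: b :: rest).getD p.length 0 = b := by simp
      have hgb : (p ++ b :: b :: rest).getD (p.length + 1) 0 = b := by simp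
      rw [loopA, dif_pos hlen, hga, hgb, if_pos rfl]
      have h1 : (p ++ b :: b :: rest).set p.length (b * 2) = p ++ b * 2 :: b :: rest := by
        rw [List.set_append_right _ _ (Nat.le_refl _)]; simp
      have h2 : (p ++ b * 2 :: b :: rest).set (p.length + 1) 0 = p ++ b * 2 :: 0 :: rest := by
        rw [List.set_append_right _ _ (by omega)]; simp
      rw [h1, h2,
        show p ++ b * 2 :: 0 :: rest = (p ++ [b * 2, 0]) ++ rest by simp,
        show p.length + 2 = (p ++ [b * 2, 0]).length by simp,
        ih]
      simp [merge0]
      ring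
  | case4 a b rest hab ih =>
      intro p s
      have hlen : p.length + 1 < (p ++ a :: b :: rest).length := by simp
      have hga : (p ++ a :: b :: rest).getD p.length 0 = a := by simp
      have hgb : (p ++ a :: b :: rest).getD (p.length + 1) 0 = b := by simp
      rw [loopA, dif_pos hlen, hga, hgb, if_neg hab,
        show p.length + 1 = (p ++ [a]).length by simp,
        show p ++ a :: b :: rest = (p ++ [a]) ++ b :: rest by simp,
        ih]
      simp [merge0, hab]

lemma merge0_filter : ∀ (xs : List Int), (∀ x ∈ xs, x ≠ 0) →
    (merge0 xs).1.filter (fun x => x != 0) = (merge1 xs).1 ∧ (merge0 xs).2 = (merge1 xs).2 := by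
  intro xs
  induction xs using merge0.induct with
  | case1 => simp [merge0, merge1]
  | case2 a =>
      intro h
      have := h a (by simp)
      simp [merge0, merge1, this]
  | case3 b rest ih =>
      intro h
      have hb : b ≠ 0 := h b (by simp)
      obtain ⟨ih1, ih2⟩ := ih (fun x hx => h x (by simp [hx]))
      refine ⟨?_, ?_⟩
      · simp [merge0, merge1, List.filter_cons, ih1]
        omega
      · simp [merge0, merge1, ih2]
  | case4 a b rest hab ih =>
      intro h
      have ha : a ≠ 0 := h a (by simp)
      obtain ⟨ih1, ih2⟩ := ih (fun x hx => h x (by simp at hx ⊢; tauto))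
      refine ⟨?_, ?_⟩
      · simp [merge0, merge1, if_neg hab, List.filter_cons, ih1]
        omega
      · simp [merge0, merge1, if_neg hab, ih2]

lemma loopB_spec : ∀ (xs : List Int),
    (∀ (a : Int) (as_ : List Int) (s : Int),
      loopB xs (a :: as_) false s
        = (as_.reverse ++ (merge1 (a :: xs)).1, s + (merge1 (a :: xs)).2))
    ∧ (∀ (acc : List Int) (s : Int),
      loopB xs acc true s = (acc.reverse ++ (merge1 xs).1, s + (merge1 xs).2))
    ∧ (∀ (s : Int), loopB xs [] false s = ((merge1 xs).1, s + (merge1 xs).2)) := by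
  intro xs
  induction xs with
  | nil =>
      refine ⟨?_, ?_, ?_⟩
      · intro a as_ s; simp [loopB, merge1]
      · intro acc s; cases acc <;> simp [loopB, merge1]
      · intro s; simp [loopB, merge1]
  | cons v rest ih =>
      obtain ⟨ih1, ih2, ih3⟩ := ih
      have hfalse : ∀ (a : Int) (as_ : List Int) (s : Int),
          loopB (v :: rest) (a :: as_) false s
            = (as_.reverse ++ (merge1 (a :: v :: rest)).1, s + (merge1 (a :: v :: rest)).2) := by
        intro a as_ s
        by_cases hav : a = v
        · subst hav
          rw [loopB, if_pos rfl, ih2]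
          simp [merge1]
          ring
        · rw [loopB, if_neg hav, ih1]
          simp [merge1, if_neg hav]
      refine ⟨hfalse, ?_, ?_⟩
      · intro acc s
        cases acc with
        | nil => rw [loopB] <;> simp [ih1]
        | cons a as_ => rw [loopB] <;> simp [ih1]
      · intro s
        rw [loopB] <;> simp [ih1]

lemma padA_spec : ∀ (xs : List Int), padA xs = xs ++ List.replicate (4 - xs.length) 0 := by
  intro xs
  induction xs using padA.induct with
  | case1 xs h ih =>
      rw [padA, if_pos h, ih]
      have : 4 - xs.length = (4 - (xs ++ [0]).length) + 1 := by simp; omega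
      rw [this, List.replicate_succ]
      simp
  | case2 xs h =>
      rw [padA, if_neg h]
      have : 4 - xs.length = 0 := by omega
      simp [this]

-- ===== VERDICT (by name: the statement is the Claim_ definition above) =====
theorem compress_merge_spec : Claim_equal_compress_merge := by
  intro row _
  unfold Spec_compress_merge
  simp only [compress_merge, compress_merge_alt]
  have hnz : ∀ x ∈ row.filter (fun x => x != 0), x ≠ 0 := by
    intro x hx
    simpa using (List.mem_filter.mp hx).2
  obtain ⟨hf, hs⟩ := merge0_filter _ hnz
  have hA := loopA_spec (row.filter (fun x => x != 0)) [] 0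
  have hB := (loopB_spec (row.filter (fun x => x != 0))).2.2 0
  simp only [List.nil_append, List.length_nil, zero_add] at hA hB
  rw [hA, hB, padA_spec]
  simp [hf, hs]
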